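-- pv_equiv track=rewrite | github.com/bootyburglar/DTFBookClub | lesson2/lesson2.py | japan_year
-- ===== SOURCE A (Python) =====
-- def japan_year(year: int) -> str:
--     """
--     輸入year西元年份 輸出日本年份
--     明治元年1868 大正元年1912 昭和元年1926 平成元年1989 令和元年2019
--
--     Args:
--         year (int):西元年份
--
--     Returns:
--         str
--
--     Examples:
--         japan_year(2000))
--         > 平成12年
--     """
--     japan_year = {
--         2019: "令和元年",
--         1989: "平成元年",
--         1926: "昭和元年",
--         1912: "大正元年",
--         1868: "明治元年",
--     }
--     for _year, name in japan_year.items():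
--         if year >= _year:
--             year_count = year - _year
--             if year_count:
--                 return name.replace('元', str(year - _year))
--             return name
--     else:
--         return ''
-- ===== SOURCE B (Python) =====
-- def japan_year(year: int) -> str:
--     """Binary search over ascending era boundaries instead of a descending linear scan."""
--     bounds = [1868, 1912, 1926, 1989, 2019]
--     names = ["明治元年", "大正元年", "昭和元年", "平成元年", "令和元年"]
--     lo, hi = 0, len(bounds)
--     while lo < hi:  # hand-rolled bisect_right
--         mid = (lo + hi) // 2
--         if bounds[mid] <= year:
--             lo = mid + 1
--         else:
--             hi = mid
--     if lo == 0:
--         return ''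
--     name = names[lo - 1]
--     diff = year - bounds[lo - 1]
--     return name if diff == 0 else name.replace('元', str(diff))
-- ===== Notes on version B (the rewrite author's own statement) =====
-- stated objective: alternative
-- what changed: Replaced A's top-down linear scan of the descending era dict with a hand-rolled bisect_right binary search over an ascending boundary list plus a single table lookup.
import Mathlib
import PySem

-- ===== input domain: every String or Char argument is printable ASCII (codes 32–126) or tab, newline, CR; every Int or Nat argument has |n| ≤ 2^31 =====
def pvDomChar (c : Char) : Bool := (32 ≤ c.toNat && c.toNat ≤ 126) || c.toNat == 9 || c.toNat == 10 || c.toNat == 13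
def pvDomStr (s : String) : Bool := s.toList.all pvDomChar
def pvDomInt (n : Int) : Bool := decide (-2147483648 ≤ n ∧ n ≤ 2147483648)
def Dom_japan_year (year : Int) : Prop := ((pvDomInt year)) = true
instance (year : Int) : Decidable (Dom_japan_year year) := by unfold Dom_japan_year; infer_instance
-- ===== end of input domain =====

-- B replaces A's descending linear scan of the era table by a binary search (hand-rolled
-- bisect_right) over the ascending boundary list; objective: alternative/idiomatic, same result.

-- ===== PORT A =====
-- A: descending scan over the era table (dict items in insertion order).
def japanLoop : List (Int × String) → Int → String
  | [], _ => ""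
  | (y, name) :: rest, year =>
    if year ≥ y then
      let c := year - y
      if c ≠ 0 then PySem.Str.replace name "元" (PySem.Int.toStr c) else name
    else japanLoop rest year

def japan_year (year : Int) : String :=
  japanLoop [(2019, "令和元年"), (1989, "平成元年"), (1926, "昭和元年"),
             (1912, "大正元年"), (1868, "明治元年")] year

-- ===== PORT B =====
-- B: hand-rolled bisect_right loop over the ascending boundary list, then one lookup.
def bisectLoop (bounds : List Int) (year : Int) (lo hi : Nat) : Nat :=
  if _h : lo < hi then
    let mid := (lo + hi) / 2
    if bounds.getD mid 0 ≤ year then bisectLoop bounds year (mid + 1) hi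
    else bisectLoop bounds year lo mid
  else lo
termination_by hi - lo
decreasing_by all_goals omega

def japan_year_alt (year : Int) : String :=
  let bounds : List Int := [1868, 1912, 1926, 1989, 2019]
  let names : List String := ["明治元年", "大正元年", "昭和元年", "平成元年", "令和元年"]
  let lo := bisectLoop bounds year 0 bounds.length
  if lo = 0 then ""
  else
    let name := names.getD (lo - 1) ""
    let diff := year - bounds.getD (lo - 1) 0
    if diff = 0 then name else PySem.Str.replace name "元" (PySem.Int.toStr diff)

-- ===== PRECONDITION & SPEC =====
def Spec_japan_year (year : Int) (out : String) : Prop := out = japan_year_alt year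
instance (year : Int) (out : String) : Decidable (Spec_japan_year year out) := by unfold Spec_japan_year; infer_instance

-- ===== CLAIM (what is proved, stated in full; the proofs are below) =====
def Claim_equal_japan_year : Prop := ∀ (year : Int), Dom_japan_year year → Spec_japan_year year (japan_year year)

-- ===== LEMMAS AND PROOFS =====

-- ===== VERDICT (by name: the statement is the Claim_ definition above) =====
theorem japan_year_spec : Claim_equal_japan_year := by
  intro year _
  unfold Spec_japan_year japan_year japan_year_alt
  by_cases h5 : (2019:Int) ≤ year
  · have h3 : (1926:Int) ≤ year := by omega
    simp [japanLoop, bisectLoop, h3, h5]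
  · by_cases h4 : (1989:Int) ≤ year
    · have h3 : (1926:Int) ≤ year := by omega
      simp [japanLoop, bisectLoop, h3, h4, h5]
    · by_cases h3 : (1926:Int) ≤ year
      · simp [japanLoop, bisectLoop, h3, h4, h5]
      · by_cases h2 : (1912:Int) ≤ year
        · simp [japanLoop, bisectLoop, h2, h3, h4, h5]
        · by_cases h1 : (1868:Int) ≤ year
          · simp [japanLoop, bisectLoop, h1, h2, h3, h4, h5]
          · simp [japanLoop, bisectLoop, h1, h2, h3, h4, h5]
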